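-- pv_equiv track=rewrite | github.com/carcelli/onto-market | src/devtools/repo_tools/_common.py | is_internal
-- ===== SOURCE A (Python) =====
-- def is_internal(module: str, known_modules: set[str]) -> bool:
--     if module in known_modules:
--         return True
--     return any(
--         known == module
--         or known.startswith(module + ".")
--         or module.startswith(known + ".")
--         for known in known_modules
--     )
-- ===== SOURCE B (Python) =====
-- def is_internal(module: str, known_modules: set[str]) -> bool:
--     if module in known_modules:
--         return True
--     for i, ch in enumerate(module):
--         if ch == "." and module[:i] in known_modules:
--             return True
--     prefix = module + "."
--     return any(known.startswith(prefix) for known in known_modules)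
-- ===== Notes on version B (the rewrite author's own statement) =====
-- stated objective: faster
-- what changed: B splits the check by prefix direction: it enumerates module's dot-boundary ancestor prefixes and tests each by set membership (replacing A's per-known module.startswith(known+'.') test), so the remaining single scan of known_modules does only the one descendant test known.startswith(module+'.').
import Mathlib
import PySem

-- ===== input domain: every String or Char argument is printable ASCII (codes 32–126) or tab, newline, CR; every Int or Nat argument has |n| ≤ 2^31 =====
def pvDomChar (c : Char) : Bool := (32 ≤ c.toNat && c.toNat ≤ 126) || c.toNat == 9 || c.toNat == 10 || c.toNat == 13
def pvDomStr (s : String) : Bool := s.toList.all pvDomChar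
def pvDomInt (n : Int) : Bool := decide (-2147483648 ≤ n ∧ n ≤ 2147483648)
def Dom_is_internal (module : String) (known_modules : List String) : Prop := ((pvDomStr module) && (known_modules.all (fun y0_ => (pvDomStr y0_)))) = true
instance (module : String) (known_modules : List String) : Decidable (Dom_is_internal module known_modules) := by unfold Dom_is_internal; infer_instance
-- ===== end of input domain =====

-- B splits the check by prefix direction: dot-boundary ancestor prefixes of module are
-- tested by set membership, and one scan of known_modules covers only the descendant case.

-- ===== PORT A =====
def is_internal (module : String) (known_modules : List String) : Bool :=
  if known_modules.contains module then true
  else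
    known_modules.any (fun known =>
      known == module
      || PySem.Chars.startswith known.toList (module.toList ++ ['.'])
      || PySem.Chars.startswith module.toList (known.toList ++ ['.']))

-- ===== PORT B =====
def is_internal_alt (module : String) (known_modules : List String) : Bool :=
  if known_modules.contains module then true
  else if (PySem.List.enumerate module.toList).any (fun p =>
      p.2 == '.'
      && known_modules.contains (String.ofList (PySem.List.slice module.toList none (some p.1)))) then
    true
  else
    let pre := module.toList ++ ['.']
    known_modules.any (fun known => PySem.Chars.startswith known.toList pre)

-- ===== PRECONDITION & SPEC =====
def Spec_is_internal (module : String) (known_modules : List String) (out : Bool) : Prop := out = is_internal_alt module known_modules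
instance (module : String) (known_modules : List String) (out : Bool) : Decidable (Spec_is_internal module known_modules out) := by unfold Spec_is_internal; infer_instance

-- ===== CLAIM (what is proved, stated in full; the proofs are below) =====
def Claim_equal_is_internal : Prop := ∀ (module : String) (known_modules : List String), Dom_is_internal module known_modules → Spec_is_internal module known_modules (is_internal module known_modules)

-- ===== LEMMAS AND PROOFS =====

-- `known + "."` is a prefix of `module` exactly when `known` is a dot-boundary ancestor prefix.
theorem dot_prefix_iff (k m : List Char) :
    k ++ ['.'] <+: m ↔ ∃ i : Nat, ∃ _ : i < m.length, m[i] = '.' ∧ m.take i = k := by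
  constructor
  · rintro ⟨t, ht⟩
    refine ⟨k.length, ?_, ?_, ?_⟩
    · subst ht; simp
    · subst ht; simp
    · subst ht
      rw [List.append_assoc, List.take_append_of_le_length le_rfl]
      simp
  · rintro ⟨i, hi, hdot, htake⟩
    have h1 : m.take (i + 1) = k ++ ['.'] := by
      rw [List.take_succ_eq_append_getElem hi, htake, hdot]
    rw [← h1]
    exact List.take_prefix _ _

theorem is_internal_eq_alt (module : String) (known_modules : List String) :
    is_internal module known_modules = is_internal_alt module known_modules := by
  unfold is_internal is_internal_alt
  by_cases hc : known_modules.contains module = true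
  · rw [if_pos hc, if_pos hc]
  · simp only [hc, if_false, Bool.false_eq_true]
    have hmem : module ∉ known_modules := by
      simpa [List.contains_iff_mem] using hc
    rw [Bool.eq_iff_iff]
    constructor
    · intro h
      rw [List.any_eq_true] at h
      obtain ⟨k, hk, hdisj⟩ := h
      simp only [Bool.or_eq_true, beq_iff_eq] at hdisj
      rcases hdisj with (heq | hsw) | hsw
      · exact absurd (heq ▸ hk) hmem
      · -- descendant direction: known.startswith(module + ".")
        split
        · rfl
        · rw [List.any_eq_true]; exact ⟨k, hk, hsw⟩
      · -- ancestor direction: module.startswith(known + ".") → a dot-boundary prefix is known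
        rw [PySem.Chars.startswith_iff, dot_prefix_iff] at hsw
        obtain ⟨i, hi, hdot, htake⟩ := hsw
        have hb2 : (PySem.List.enumerate module.toList).any (fun p =>
            p.2 == '.'
            && known_modules.contains (String.ofList (PySem.List.slice module.toList none (some p.1)))) = true := by
          rw [List.any_eq_true]
          refine ⟨((i : Int), module.toList[i]), ?_, ?_⟩
          · exact (PySem.List.mem_enumerate_iff _ 0 _).2 ⟨i, hi, by simp⟩
          · have hsl : PySem.List.slice module.toList none (some ((i : Int))) = module.toList.take i := by
              rw [PySem.List.slice_to _ (Int.natCast_nonneg i)]; simp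
            simp only [hdot, hsl, htake, String.ofList_toList, Bool.and_eq_true,
              beq_self_eq_true, true_and]
            rw [List.contains_iff_mem]; exact hk
        rw [if_pos hb2]
    · intro h
      split at h
      · rename_i h2
        rw [List.any_eq_true] at h2
        obtain ⟨p, hp, hcond⟩ := h2
        obtain ⟨i, hi, hpe⟩ := (PySem.List.mem_enumerate_iff _ 0 p).1 hp
        subst hpe
        simp only [Bool.and_eq_true, beq_iff_eq] at hcond
        obtain ⟨hdot, hcont⟩ := hcond
        rw [List.contains_iff_mem] at hcont
        rw [List.any_eq_true]
        refine ⟨_, hcont, ?_⟩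
        simp only [Bool.or_eq_true]
        right
        rw [PySem.Chars.startswith_iff, dot_prefix_iff]
        exact ⟨i, hi, hdot, by simp⟩
      · rw [List.any_eq_true] at h ⊢
        obtain ⟨k, hk, hsw⟩ := h
        exact ⟨k, hk, by simp [hsw]⟩

-- ===== VERDICT (by name: the statement is the Claim_ definition above) =====
theorem is_internal_spec : Claim_equal_is_internal := by
  intro module known_modules _
  unfold Spec_is_internal
  exact is_internal_eq_alt module known_modules
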